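-- pv_equiv track=rewrite | github.com/MaddSystems/elmachin | utilities/classifier.py | _process_video_placeholders
-- ===== SOURCE A (Python) =====
-- VIDEOS_DICT = {
--     "${v1}": "machin-v1-rastreo-satelital-c.mp4",
--     "${v2}": "machin-v2-particulares-c.mp4",
--     "${v3}": "machin-v3-bienvenida-app-c.mp4",
--     "${v4}": "machin-v4-industrias_c.mp4",
--     "${v5}": "machin-v5-monitoreo_dedicado_c.mp4",
--     "${v6}": "machin-v6-vvm_c.mp4",
--     "${v7}": "machin-v7-diferenciadores_c.mp4",
--     "${v8}": "machin-v8-accesorios_c.mp4",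
--     "${v9}": "machin-v9-ivan-on_c.mp4",
--     "${v10}": "machin-v10-combustible_c.mp4",
--     "${v11}": "machin-v11-mantenimientos_c.mp4",
--     "${v12}": "machin-v12-adasydms_c.mp4",
--     "${v13}": "machin-v13-cadena-de-frío_c.mp4",
--     "${v14}": "machin-v14-beneficios_c.mp4",
--     "${v15}": "machin-v15-gpscontrol_c.mp4",
--     "${v16}": "machin-v16-visualizacion-de-camaras_c.mp4"
-- }
--
-- VIDEOS_INFO = {
--     "${machin-v1-rastreo-satelital-c}": "Explicación básica del rastreo satelital.",
--     "${machin-v2-particulares-c}": "Soluciones para particulares.",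
--     "${machin-v3-bienvenida-app-c}": "Introducción a la aplicación de GPScontrol.",
--     "${machin-v4-industrias}": "Soluciones para Empresas Industrias.",
--     "${machin-v5-monitoreo_dedicado_c}": "Monitoreo dedicado para flotas.",
--     "${machin-v6-vvm_c}": "Videovigilancia móvil (VVM).",
--     "${machin-v7-diferenciadores_c}": "Diferenciadores de GPScontrol frente a la competencia.",
--     "${machin-v8-accesorios_c}": "Accesorios disponibles para el sistema.",
--     "${machin-v9-ivan-on_c}": "Ivan-On Asistente Virtual en Cabina.",
--     "${machin-v10-combustible_c}": "Control de combustible.",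
--     "${machin-v11-mantenimientos_c}": "Mantenimientos preventivos.",
--     "${machin-v12-adasydms_c}": "Cámaras ADAS y DMS para seguridad avanzada.",
--     "${machin-v13-cadena-de-frío_c}": "Soluciones para la cadena de frío.",
--     "${machin-v14-beneficios_c}": "Beneficios clave de contratar servicios con GPScontrol.",
--     "${machin-v15-gpscontrol_c}": "Presentación general de GPScontrol.",
--     "${machin-v16-visualizacion-de-camaras_c}": "Ejemplos de Visualización de cámaras en tiempo real."
-- }
--
-- def _process_video_placeholders(response: str) -> str:
--     """Process video placeholders in responses"""
--     # Replace ${video} with video information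
--     if "${video}" in response:
--         response = response.replace("${video}",
--             "🎥 Te comparto un video explicativo sobre nuestros servicios.")
--
--     # Replace specific video references
--     for placeholder, video_file in VIDEOS_DICT.items():
--         if placeholder in response:
--             video_info = VIDEOS_INFO.get(placeholder.replace("${", "${machin-"), "Video informativo")
--             response = response.replace(placeholder, f"🎥 {video_info}")
--
--     return response
-- ===== SOURCE B (Python) =====
-- # Single left-to-right scan with a fixed replacement table.
-- # Note: for every key "${vN}" the original code looks up "${machin-vN}" in VIDEOS_INFO,
-- # whose keys all look like "${machin-v1-rastreo-satelital-c}" -- the lookup always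
-- # misses, so every video key is replaced by the default "🎥 Video informativo".
-- _REPLACEMENTS = [("${video}",
--                   "🎥 Te comparto un video explicativo sobre nuestros servicios.")] + [
--     ("${v" + str(i) + "}", "🎥 Video informativo") for i in range(1, 17)
-- ]
--
--
-- def _process_video_placeholders(response: str) -> str:
--     """Process video placeholders in responses (single left-to-right pass)."""
--     out = []
--     i = 0
--     n = len(response)
--     while i < n:
--         for key, rep in _REPLACEMENTS:
--             if response.startswith(key, i):
--                 out.append(rep)
--                 i += len(key)
--                 break
--         else:
--             out.append(response[i])
--             i += 1
--     return "".join(out)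
-- ===== Notes on version B (the rewrite author's own statement) =====
-- stated objective: alternative
-- what changed: B replaces A's 17 membership tests plus full-string str.replace passes by one fixed replacement table (the VIDEOS_INFO lookup in A always misses, so each video key maps to the default '🎥 Video informativo') and a single left-to-right scan of the response that substitutes each matched placeholder in place.
import Mathlib
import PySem

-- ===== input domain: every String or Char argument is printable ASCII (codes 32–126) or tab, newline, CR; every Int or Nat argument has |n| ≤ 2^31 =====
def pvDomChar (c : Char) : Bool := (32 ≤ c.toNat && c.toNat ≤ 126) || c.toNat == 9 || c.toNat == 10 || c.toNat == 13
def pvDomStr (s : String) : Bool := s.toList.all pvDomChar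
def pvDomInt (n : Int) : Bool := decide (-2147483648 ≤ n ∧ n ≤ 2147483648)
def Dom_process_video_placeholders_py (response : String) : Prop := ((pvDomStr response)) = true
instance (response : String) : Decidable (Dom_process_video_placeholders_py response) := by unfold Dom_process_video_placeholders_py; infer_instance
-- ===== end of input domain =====

-- B replaces A's 17 repeated full-string `str.replace` scans by one fixed replacement table and a
-- single left-to-right scan of the response (objective: alternative single-pass algorithm).


-- ===== PORT A =====
def pvVIDEOS_DICT : PySem.Dict String String := PySem.Dict.ofList [
  ("${v1}", "machin-v1-rastreo-satelital-c.mp4"),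
  ("${v2}", "machin-v2-particulares-c.mp4"),
  ("${v3}", "machin-v3-bienvenida-app-c.mp4"),
  ("${v4}", "machin-v4-industrias_c.mp4"),
  ("${v5}", "machin-v5-monitoreo_dedicado_c.mp4"),
  ("${v6}", "machin-v6-vvm_c.mp4"),
  ("${v7}", "machin-v7-diferenciadores_c.mp4"),
  ("${v8}", "machin-v8-accesorios_c.mp4"),
  ("${v9}", "machin-v9-ivan-on_c.mp4"),
  ("${v10}", "machin-v10-combustible_c.mp4"),
  ("${v11}", "machin-v11-mantenimientos_c.mp4"),
  ("${v12}", "machin-v12-adasydms_c.mp4"),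
  ("${v13}", "machin-v13-cadena-de-frío_c.mp4"),
  ("${v14}", "machin-v14-beneficios_c.mp4"),
  ("${v15}", "machin-v15-gpscontrol_c.mp4"),
  ("${v16}", "machin-v16-visualizacion-de-camaras_c.mp4")]

def pvVIDEOS_INFO : PySem.Dict String String := PySem.Dict.ofList [
  ("${machin-v1-rastreo-satelital-c}", "Explicación básica del rastreo satelital."),
  ("${machin-v2-particulares-c}", "Soluciones para particulares."),
  ("${machin-v3-bienvenida-app-c}", "Introducción a la aplicación de GPScontrol."),
  ("${machin-v4-industrias}", "Soluciones para Empresas Industrias."),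
  ("${machin-v5-monitoreo_dedicado_c}", "Monitoreo dedicado para flotas."),
  ("${machin-v6-vvm_c}", "Videovigilancia móvil (VVM)."),
  ("${machin-v7-diferenciadores_c}", "Diferenciadores de GPScontrol frente a la competencia."),
  ("${machin-v8-accesorios_c}", "Accesorios disponibles para el sistema."),
  ("${machin-v9-ivan-on_c}", "Ivan-On Asistente Virtual en Cabina."),
  ("${machin-v10-combustible_c}", "Control de combustible."),
  ("${machin-v11-mantenimientos_c}", "Mantenimientos preventivos."),
  ("${machin-v12-adasydms_c}", "Cámaras ADAS y DMS para seguridad avanzada."),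
  ("${machin-v13-cadena-de-frío_c}", "Soluciones para la cadena de frío."),
  ("${machin-v14-beneficios_c}", "Beneficios clave de contratar servicios con GPScontrol."),
  ("${machin-v15-gpscontrol_c}", "Presentación general de GPScontrol."),
  ("${machin-v16-visualizacion-de-camaras_c}", "Ejemplos de Visualización de cámaras en tiempo real.")]

def process_video_placeholders_py (response : String) : String :=
  let response1 :=
    if PySem.Str.isIn "${video}" response then
      PySem.Str.replace response "${video}" "🎥 Te comparto un video explicativo sobre nuestros servicios."
    else response
  (PySem.Dict.items pvVIDEOS_DICT).foldl (fun response pv =>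
    if PySem.Str.isIn pv.1 response then
      let video_info := PySem.Dict.getD pvVIDEOS_INFO (PySem.Str.replace pv.1 "${" "${machin-") "Video informativo"
      PySem.Str.replace response pv.1 ("🎥 " ++ video_info)
    else response) response1

-- ===== PORT B =====
-- Source B's fixed replacement table _REPLACEMENTS: "${video}" plus the range-generated video keys,
-- each mapping to the constant "🎥 Video informativo" (A's VIDEOS_INFO lookup always misses)
def pvReplacements : List (String × String) :=
  ("${video}", "🎥 Te comparto un video explicativo sobre nuestros servicios.") ::
  (PySem.List.pyRange 1 17 1).map (fun i => ("${v" ++ PySem.Int.toStr i ++ "}", "🎥 Video informativo"))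

-- Source B's while loop: at each position emit the first table entry the rest of the string
-- starts with (advancing past it), else copy one character
def pvScan (ps : List (List Char × List Char)) : List Char → List Char
  | [] => []
  | c :: t =>
    match ps.find? (fun pr => pr.1.isPrefixOf (c :: t)) with
    | some pr => pr.2 ++ pvScan ps (t.drop (pr.1.length - 1))
    | none => c :: pvScan ps t
termination_by l => l.length
decreasing_by
  all_goals simp

def process_video_placeholders_py_alt (response : String) : String :=
  String.ofList (pvScan (pvReplacements.map (fun pr => (pr.1.toList, pr.2.toList))) response.toList)

-- ===== PRECONDITION & SPEC =====
def Spec_process_video_placeholders_py (response : String) (out : String) : Prop := out = process_video_placeholders_py_alt response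
instance (response : String) (out : String) : Decidable (Spec_process_video_placeholders_py response out) := by unfold Spec_process_video_placeholders_py; infer_instance

-- ===== CLAIM (what is proved, stated in full; the proofs are below) =====
def Claim_equal_process_video_placeholders_py : Prop := ∀ (response : String), Dom_process_video_placeholders_py response → Spec_process_video_placeholders_py response (process_video_placeholders_py response)

-- ===== LEMMAS AND PROOFS =====

-- a "good" replacement pair: the pattern starts with '$' and has no further '$' and no '🎥';
-- the replacement starts with '🎥' and has no '$'
def pvGoodb (pr : List Char × List Char) : Bool :=
  pr.1.head? == some '$' && pr.2.head? == some '🎥' &&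
  !pr.2.contains '$' && !pr.1.tail.contains '$' && !pr.1.tail.contains '🎥'

theorem pvScan_nil (ps : List (List Char × List Char)) : pvScan ps [] = [] := by
  simp [pvScan]

theorem pvScan_cons_some (ps : List (List Char × List Char)) (c : Char) (t : List Char)
    (pr : List Char × List Char)
    (h : ps.find? (fun pr => pr.1.isPrefixOf (c :: t)) = some pr) :
    pvScan ps (c :: t) = pr.2 ++ pvScan ps (t.drop (pr.1.length - 1)) := by
  rw [pvScan, h]

theorem pvScan_cons_none (ps : List (List Char × List Char)) (c : Char) (t : List Char)
    (h : ps.find? (fun pr => pr.1.isPrefixOf (c :: t)) = none) :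
    pvScan ps (c :: t) = c :: pvScan ps t := by
  rw [pvScan, h]

-- no pattern matches at any position of a '$'-free block: the scan copies it
theorem pvScan_copy (ps : List (List Char × List Char))
    (hps : ∀ pr ∈ ps, pr.1.head? = some '$') :
    ∀ (u t : List Char), (∀ c ∈ u, c ≠ '$') → pvScan ps (u ++ t) = u ++ pvScan ps t := by
  intro u
  induction u with
  | nil => intro t _; simp
  | cons c u ih =>
    intro t hu
    have hc : c ≠ '$' := hu c (by simp)
    have hnone : ps.find? (fun pr => pr.1.isPrefixOf (c :: (u ++ t))) = none := by
      apply List.find?_eq_none.2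
      intro pr hpr
      have hh := hps pr hpr
      cases h1 : pr.1 with
      | nil => simp [h1] at hh
      | cons d r =>
        simp [h1] at hh
        simp [h1, hh, List.isPrefixOf]
        intro h; exact absurd h.symm hc
    rw [List.cons_append, pvScan_cons_none _ _ _ hnone, ih t (fun c hc' => hu c (by simp [hc']))]
    simp

-- an '🎥'-free prefix of the scan output is a prefix of the input
theorem pvScan_prefix_reflect (ps : List (List Char × List Char))
    (hps : ∀ pr ∈ ps, pr.2.head? = some '🎥') :
    ∀ (t u : List Char), '🎥' ∉ u → u <+: pvScan ps t → u <+: t := by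
  intro t
  induction t with
  | nil => intro u _ h; simpa [pvScan_nil] using h
  | cons c t ih =>
    intro u hu h
    cases hf : ps.find? (fun pr => pr.1.isPrefixOf (c :: t)) with
    | some pr =>
      rw [pvScan_cons_some _ _ _ _ hf] at h
      have hmem := List.mem_of_find?_eq_some hf
      have hh := hps pr hmem
      cases u with
      | nil => exact List.nil_prefix
      | cons d u' =>
        exfalso
        cases h2 : pr.2 with
        | nil => simp [h2] at hh
        | cons e r2 =>
          simp [h2] at hh
          rw [h2] at h
          have := (List.cons_prefix_cons.1 h).1
          exact hu (by simp [this, hh])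
    | none =>
      rw [pvScan_cons_none _ _ _ hf] at h
      cases u with
      | nil => exact List.nil_prefix
      | cons d u' =>
        obtain ⟨hd, h'⟩ := List.cons_prefix_cons.1 h
        have := ih u' (fun hm => hu (by simp [hm])) h'
        exact List.cons_prefix_cons.2 ⟨hd, this⟩

-- PySem's str.replace worker equals the one-pattern scan
theorem pvGo_eq (p r : List Char) (hp : p ≠ []) :
    ∀ (fuel : Nat) (l acc : List Char), l.length ≤ fuel →
      PySem.Chars.replace.go p r fuel l acc = acc.reverse ++ pvScan [(p, r)] l := by
  intro fuel
  induction fuel with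
  | zero =>
    intro l acc hl
    have : l = [] := List.eq_nil_of_length_eq_zero (Nat.le_zero.1 hl)
    subst this
    simp [PySem.Chars.replace.go, pvScan_nil]
  | succ fuel ih =>
    intro l acc hl
    cases l with
    | nil => simp [PySem.Chars.replace.go, pvScan_nil]
    | cons c t =>
      obtain ⟨k, hk⟩ : ∃ k, p.length = k + 1 := by
        cases p with
        | nil => exact absurd rfl hp
        | cons a b => exact ⟨b.length, rfl⟩
      cases hpre : p.isPrefixOf (c :: t)
      · rw [PySem.Chars.replace.go]
        simp only [hpre, Bool.false_eq_true, if_false]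
        rw [ih _ _ (by simpa using Nat.le_of_succ_le_succ hl)]
        have hfind : ([(p, r)] : List (List Char × List Char)).find?
            (fun pr => pr.1.isPrefixOf (c :: t)) = none := by
          simp [List.find?, hpre]
        rw [pvScan_cons_none _ _ _ hfind]
        simp
      · rw [PySem.Chars.replace.go]
        simp only [hpre, if_true]
        rw [ih _ _ (by simp [hk] at hl ⊢; omega)]
        have hfind : ([(p, r)] : List (List Char × List Char)).find?
            (fun pr => pr.1.isPrefixOf (c :: t)) = some (p, r) := by
          simp [List.find?, hpre]
        rw [pvScan_cons_some _ _ _ _ hfind]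
        simp [hk]

theorem pvReplace_eq_scan (s p r : List Char) (hp : p ≠ []) :
    PySem.Chars.replace s p r = pvScan [(p, r)] s := by
  rw [PySem.Chars.replace]
  have : p.isEmpty = false := by cases p with | nil => exact absurd rfl hp | cons a b => rfl
  rw [this]
  simpa using pvGo_eq p r hp s.length s [] (le_refl _)

theorem pvScan_not_infix (p r : List Char) :
    ∀ s, ¬ p <:+: s → pvScan [(p, r)] s = s := by
  intro s
  induction s with
  | nil => intro _; exact pvScan_nil _
  | cons c t ih =>
    intro h
    have hpre : p.isPrefixOf (c :: t) = false := by
      by_contra hb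
      exact h ((List.isPrefixOf_iff_prefix.1 (by simpa using hb)).isInfix)
    have hfind : ([(p, r)] : List (List Char × List Char)).find?
        (fun pr => pr.1.isPrefixOf (c :: t)) = none := by
      simp [List.find?, hpre]
    rw [pvScan_cons_none _ _ _ hfind, ih (fun hi => h (List.infix_cons hi))]

-- one step of A ("if placeholder in response: response = response.replace(...)") char-level
theorem pvStep_eq (p r s : String) (hp : p.toList ≠ []) :
    (if PySem.Str.isIn p s then PySem.Str.replace s p r else s).toList
      = pvScan [(p.toList, r.toList)] s.toList := by
  by_cases h : PySem.Str.isIn p s = true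
  · rw [if_pos h, PySem.Str.toList_replace, pvReplace_eq_scan _ _ _ hp]
  · rw [if_neg h]
    have : ¬ p.toList <:+: s.toList := fun hi => h ((PySem.Str.isIn_iff_infix p s).2 hi)
    rw [pvScan_not_infix _ _ _ this]

-- A's fold of guarded replaces, char-level
theorem pvFoldA (f : String × String → String) :
    ∀ (L : List (String × String)) (s : String), (∀ pr ∈ L, pr.1.toList ≠ []) →
    (L.foldl (fun resp pr =>
        if PySem.Str.isIn pr.1 resp then PySem.Str.replace resp pr.1 (f pr) else resp) s).toList
      = (L.map (fun pr => (pr.1.toList, (f pr).toList))).foldl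
          (fun cs pr => pvScan [pr] cs) s.toList := by
  intro L
  induction L with
  | nil => intro s _; rfl
  | cons pr L ih =>
    intro s hL
    rw [List.foldl_cons, List.map_cons, List.foldl_cons,
      ih _ (fun q hq => hL q (by simp [hq])),
      pvStep_eq pr.1 (f pr) s (hL pr (by simp))]

-- the key composition: appending one more good pattern to the scan equals
-- scanning its singleton afterwards
theorem pvScan_comp (ps : List (List Char × List Char)) (q rq : List Char)
    (hps : ∀ pr ∈ ps, pvGoodb pr = true) (hq : pvGoodb (q, rq) = true) :
    ∀ s, pvScan [(q, rq)] (pvScan ps s) = pvScan (ps ++ [(q, rq)]) s := by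
  suffices H : ∀ (n : Nat) (s : List Char), s.length ≤ n →
      pvScan [(q, rq)] (pvScan ps s) = pvScan (ps ++ [(q, rq)]) s by
    intro s; exact H s.length s (le_refl _)
  simp only [pvGoodb, Bool.and_eq_true, beq_iff_eq, Bool.not_eq_true',
    List.contains_eq_mem, decide_eq_false_iff_not] at hq
  obtain ⟨⟨⟨⟨hqh, hrh⟩, hrd⟩, hqtd⟩, hqtc⟩ := hq
  obtain ⟨qt, hqdef⟩ : ∃ qt, q = '$' :: qt := by
    cases hq1 : q with
    | nil => simp [hq1] at hqh
    | cons a b => simp [hq1] at hqh; exact ⟨b, by rw [hqh]⟩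
  subst hqdef
  simp only [List.tail_cons] at hqtd hqtc
  have hpsH : ∀ pr ∈ ps, pr.1.head? = some '$' := by
    intro pr hpr
    have := hps pr hpr
    simp [pvGoodb, Bool.and_eq_true] at this
    exact this.1.1.1.1
  have hpsR : ∀ pr ∈ ps, pr.2.head? = some '🎥' := by
    intro pr hpr
    have := hps pr hpr
    simp [pvGoodb, Bool.and_eq_true] at this
    exact this.1.1.1.2
  have hqH : ∀ pr ∈ ([('$' :: qt, rq)] : List (List Char × List Char)), pr.1.head? = some '$' := by
    intro pr hpr
    simp at hpr
    simp [hpr]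
  intro n
  induction n with
  | zero =>
    intro s hs
    have : s = [] := List.eq_nil_of_length_eq_zero (Nat.le_zero.1 hs)
    subst this
    simp [pvScan_nil]
  | succ n ih =>
    intro s hs
    cases s with
    | nil => simp [pvScan_nil]
    | cons c t =>
      have ht : t.length ≤ n := by simpa using Nat.le_of_succ_le_succ hs
      cases hf : ps.find? (fun pr => pr.1.isPrefixOf (c :: t)) with
      | some pr =>
        have hmem := List.mem_of_find?_eq_some hf
        have hgood := hps pr hmem
        simp only [pvGoodb, Bool.and_eq_true, beq_iff_eq, Bool.not_eq_true',
          List.contains_eq_mem, decide_eq_false_iff_not] at hgood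
        rw [pvScan_cons_some _ _ _ _ hf]
        rw [pvScan_copy [('$' :: qt, rq)] hqH pr.2 _
          (fun c hc => by rintro rfl; exact hgood.1.1.2 hc)]
        rw [ih _ (le_trans (by simpa using List.length_drop_le _ _) ht)]
        have hf' : (ps ++ [('$' :: qt, rq)]).find? (fun pr => pr.1.isPrefixOf (c :: t)) = some pr := by
          rw [List.find?_append, hf]; rfl
        rw [pvScan_cons_some _ _ _ _ hf']
      | none =>
        cases hpre : ('$' :: qt).isPrefixOf (c :: t)
        · -- nothing matches here on either side
          rw [pvScan_cons_none _ _ _ hf]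
          have hnp : ('$' :: qt).isPrefixOf (c :: pvScan ps t) = false := by
            by_contra hb
            have hpp : '$' :: qt <+: c :: pvScan ps t := by
              simpa [List.isPrefixOf_iff_prefix] using hb
            obtain ⟨hcc, hqt⟩ := List.cons_prefix_cons.1 hpp
            have hqtt := pvScan_prefix_reflect ps hpsR t qt hqtc hqt
            have hpt : '$' :: qt <+: c :: t := List.cons_prefix_cons.2 ⟨hcc, hqtt⟩
            exact absurd (List.isPrefixOf_iff_prefix.2 hpt) (by simp [hpre])
          have hfind1 : ([('$' :: qt, rq)] : List (List Char × List Char)).find?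
              (fun pr => pr.1.isPrefixOf (c :: pvScan ps t)) = none := by
            simp [List.find?, hnp]
          rw [pvScan_cons_none _ _ _ hfind1, ih t ht]
          have hf' : (ps ++ [('$' :: qt, rq)]).find?
              (fun pr => pr.1.isPrefixOf (c :: t)) = none := by
            rw [List.find?_append, hf]
            simp [List.find?, hpre]
          rw [pvScan_cons_none _ _ _ hf']

        · -- q matches here; neither side's ps-part does
          have hqpre : '$' :: qt <+: c :: t := List.isPrefixOf_iff_prefix.1 hpre
          have hc : c = '$' := ((List.cons_prefix_cons.1 hqpre).1).symm
          subst hc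
          obtain ⟨t2, ht2⟩ : ∃ t2, t = qt ++ t2 := by
            obtain ⟨rest, hrest⟩ := hqpre
            exact ⟨rest, by simpa using congrArg List.tail hrest.symm⟩
          subst ht2
          have hdrop : (qt ++ t2).drop (('$' :: qt).length - 1) = t2 := by simp
          -- left side: ps copies q, then the singleton fires
          rw [pvScan_cons_none _ _ _ hf]
          have hcopy : pvScan ps (qt ++ t2) = qt ++ pvScan ps t2 :=
            pvScan_copy ps hpsH qt t2 (fun c hc => by rintro rfl; exact hqtd hc)
          rw [hcopy]
          have hpre2 : ('$' :: qt).isPrefixOf ('$' :: (qt ++ pvScan ps t2)) = true :=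
            List.isPrefixOf_iff_prefix.2 (by simpa using List.prefix_append qt _)
          have hfind1 : ([('$' :: qt, rq)] : List (List Char × List Char)).find?
              (fun pr => pr.1.isPrefixOf ('$' :: (qt ++ pvScan ps t2))) = some ('$' :: qt, rq) := by
            simp [List.find?, hpre2]
          rw [pvScan_cons_some _ _ _ _ hfind1]
          have hdrop2 : (qt ++ pvScan ps t2).drop (('$' :: qt).length - 1) = pvScan ps t2 := by simp
          rw [hdrop2, ih t2 (le_trans (by simp) ht)]
          -- right side
          have hf' : (ps ++ [('$' :: qt, rq)]).find?
              (fun pr => pr.1.isPrefixOf ('$' :: (qt ++ t2))) = some ('$' :: qt, rq) := by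
            have hqq : qt.isPrefixOf (qt ++ t2) = true :=
              List.isPrefixOf_iff_prefix.2 (List.prefix_append qt t2)
            rw [List.find?_append, hf]
            simp [List.find?, hqq]
          rw [pvScan_cons_some _ _ _ _ hf', hdrop]

theorem pvScan_nil_ps : ∀ s : List Char, pvScan [] s = s := by
  intro s
  induction s with
  | nil => exact pvScan_nil _
  | cons c t ih => rw [pvScan_cons_none _ _ _ (by simp), ih]

-- folding the singleton scans equals one scan with the whole table
theorem pvScan_chain (L : List (List Char × List Char)) (hL : ∀ pr ∈ L, pvGoodb pr = true) :
    ∀ s, L.foldl (fun cs pr => pvScan [pr] cs) s = pvScan L s := by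
  induction L using List.reverseRecOn with
  | nil => intro s; rw [pvScan_nil_ps]; rfl
  | append_singleton L pr ih =>
    intro s
    rw [List.foldl_append, List.foldl_cons, List.foldl_nil,
      ih (fun q hq => hL q (by simp [hq])) s,
      ← pvScan_comp L pr.1 pr.2 (fun q hq => hL q (by simp [hq])) (hL pr (by simp))]

-- the one concrete fact connecting the two programs: A's pattern/replacement pairs ARE B's table
theorem pvTables_eq :
    (("${video}".toList, ("🎥 Te comparto un video explicativo sobre nuestros servicios." : String).toList) ::
      (PySem.Dict.items pvVIDEOS_DICT).map (fun pv => (pv.1.toList,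
        (("🎥 " : String) ++ PySem.Dict.getD pvVIDEOS_INFO
          (PySem.Str.replace pv.1 "${" "${machin-") "Video informativo").toList)))
      = pvReplacements.map (fun pr => (pr.1.toList, pr.2.toList)) := by
  decide

theorem pvTables_good :
    ∀ pr ∈ pvReplacements.map (fun pr => (pr.1.toList, pr.2.toList)), pvGoodb pr = true := by
  decide

theorem pvItems_ne : ∀ pr ∈ PySem.Dict.items pvVIDEOS_DICT, pr.1.toList ≠ ([] : List Char) := by
  decide

-- ===== VERDICT (by name: the statement is the Claim_ definition above) =====
theorem process_video_placeholders_py_spec : Claim_equal_process_video_placeholders_py := by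
  intro response _
  unfold Spec_process_video_placeholders_py
  have htl : (process_video_placeholders_py response).toList
      = (process_video_placeholders_py_alt response).toList := by
    rw [process_video_placeholders_py, process_video_placeholders_py_alt, String.toList_ofList]
    rw [pvFoldA (fun pv => ("🎥 " : String) ++ PySem.Dict.getD pvVIDEOS_INFO
        (PySem.Str.replace pv.1 "${" "${machin-") "Video informativo")
      (PySem.Dict.items pvVIDEOS_DICT) _ pvItems_ne]
    rw [pvStep_eq "${video}" "🎥 Te comparto un video explicativo sobre nuestros servicios."
      response (by decide)]
    rw [show pvScan [(("${video}" : String).toList,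
        ("🎥 Te comparto un video explicativo sobre nuestros servicios." : String).toList)]
        response.toList
      = List.foldl (fun cs pr => pvScan [pr] cs) response.toList
          [(("${video}" : String).toList,
            ("🎥 Te comparto un video explicativo sobre nuestros servicios." : String).toList)] from rfl]
    rw [← List.foldl_append, List.singleton_append]
    rw [show ((("${video}" : String).toList,
          ("🎥 Te comparto un video explicativo sobre nuestros servicios." : String).toList) ::
        (PySem.Dict.items pvVIDEOS_DICT).map (fun pv : String × String => (pv.1.toList,
          (("🎥 " : String) ++ PySem.Dict.getD pvVIDEOS_INFO
            (PySem.Str.replace pv.1 "${" "${machin-") "Video informativo").toList)))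
      = pvReplacements.map (fun pr => (pr.1.toList, pr.2.toList)) from pvTables_eq]
    exact pvScan_chain _ pvTables_good response.toList
  calc process_video_placeholders_py response
      = String.ofList (process_video_placeholders_py response).toList := String.ofList_toList.symm
    _ = String.ofList (process_video_placeholders_py_alt response).toList := by rw [htl]
    _ = process_video_placeholders_py_alt response := String.ofList_toList
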